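-- pv_equiv track=rewrite | github.com/kimtth/neet-code-top-150-python | python/0678_valid_parenthesis_string/0678_valid_parenthesis_string.py | checkValidString_dp
-- ===== SOURCE A (Python) =====
-- def checkValidString_dp(s: str) ->bool:
--     """
--     Alternative implementation using dynamic programming.
--
--     Args:
--         s: The input string containing only '(', ')' and '*'
--
--     Returns:
--         bool: True if the string is valid, False otherwise
--     """
--     n = len(s)
--     if n == 0:
--         return True
--     dp = [([False] * n) for _ in range(n)]
--     for i in range(n):
--         if s[i] == '*':
--             dp[i][i] = True
--     for i in range(n - 1):
--         if (s[i] == '(' or s[i] == '*') and (s[i + 1] == ')' or s[i + 1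
--             ] == '*'):
--             dp[i][i + 1] = True
--     for length in range(3, n + 1):
--         for i in range(n - length + 1):
--             j = i + length - 1
--             if s[i] == '*' and dp[i + 1][j]:
--                 dp[i][j] = True
--                 continue
--             if (s[i] == '(' or s[i] == '*') and (s[j] == ')' or s[j] == '*'
--                 ):
--                 if j - i == 1 or dp[i + 1][j - 1]:
--                     dp[i][j] = True
--                     continue
--             for k in range(i, j):
--                 if dp[i][k] and dp[k + 1][j]:
--                     dp[i][j] = True
--                     break
--     return dp[0][n - 1]
-- ===== SOURCE B (Python) =====
-- def checkValidString_dp(s: str) -> bool: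
--     # One-pass greedy: track the interval [lo, hi] of possible open-paren counts.
--     lo = 0
--     hi = 0
--     for c in s:
--         if c == '(':
--             lo += 1
--             hi += 1
--         elif c == ')':
--             lo -= 1
--             hi -= 1
--         elif c == '*':
--             lo -= 1
--             hi += 1
--         else:
--             return False
--         if hi < 0:
--             return False
--         if lo < 0:
--             lo = 0
--     return lo == 0
-- ===== Notes on version B (the rewrite author's own statement) =====
-- stated objective: faster
-- what changed: Replaced the O(n^3) interval dynamic-programming table over all substrings by a single left-to-right greedy pass tracking the interval [lo,hi] of possible open-paren counts.
import Mathlib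
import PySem

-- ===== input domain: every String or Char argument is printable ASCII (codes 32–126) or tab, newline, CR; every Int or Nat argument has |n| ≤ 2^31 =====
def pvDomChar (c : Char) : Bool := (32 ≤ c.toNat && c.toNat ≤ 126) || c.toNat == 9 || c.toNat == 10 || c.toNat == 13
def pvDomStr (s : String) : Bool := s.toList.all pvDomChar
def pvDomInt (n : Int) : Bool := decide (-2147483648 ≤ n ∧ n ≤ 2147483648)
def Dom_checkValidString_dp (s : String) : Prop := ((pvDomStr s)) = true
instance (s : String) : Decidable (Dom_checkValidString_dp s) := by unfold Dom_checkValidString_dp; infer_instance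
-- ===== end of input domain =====

-- B replaces A's O(n^3) interval DP by a one-pass greedy tracking the range [lo,hi] of possible open counts (objective: faster).

-- ===== PORT A =====
-- character tests as in A's conditions
def pvStar (c : Char) : Bool := c == '*'
def pvOpenC (c : Char) : Bool := c == '(' || c == '*'
def pvCloseC (c : Char) : Bool := c == ')' || c == '*'
-- dp is a list of rows; all reads/writes are at in-range indices i,j < n
def pvGet2 (t : List (List Bool)) (i j : Nat) : Bool := (t.getD i []).getD j false
def pvSet2 (t : List (List Bool)) (i j : Nat) (v : Bool) : List (List Bool) :=
  t.set i ((t.getD i []).set j v)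

-- for i in range(n): if s[i]=='*': dp[i][i]=True
def pvLoop1 (cs : List Char) : List Nat → List (List Bool) → List (List Bool)
  | [], t => t
  | i :: rest, t => pvLoop1 cs rest (if pvStar (cs.getD i ' ') then pvSet2 t i i true else t)

-- for i in range(n-1): if (s[i] in '(* ') and (s[i+1] in ')*'): dp[i][i+1]=True
def pvLoop2 (cs : List Char) : List Nat → List (List Bool) → List (List Bool)
  | [], t => t
  | i :: rest, t =>
    pvLoop2 cs rest
      (if pvOpenC (cs.getD i ' ') && pvCloseC (cs.getD (i+1) ' ') then pvSet2 t i (i+1) true else t)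

-- for k in range(i, j): if dp[i][k] and dp[k+1][j]: dp[i][j]=True; break
def pvKLoop (i j : Nat) : List Nat → List (List Bool) → List (List Bool)
  | [], t => t
  | k :: rest, t =>
    if pvGet2 t i k && pvGet2 t (k+1) j then pvSet2 t i j true else pvKLoop i j rest t

-- the body of the inner i-loop of the length loop (the two `continue` ifs, then the k-loop)
def pvBody (cs : List Char) (t : List (List Bool)) (i j : Nat) : List (List Bool) :=
  if pvStar (cs.getD i ' ') && pvGet2 t (i+1) j then pvSet2 t i j true
  else if (pvOpenC (cs.getD i ' ') && pvCloseC (cs.getD j ' ')) && ((j == i + 1) || pvGet2 t (i+1) (j-1)) then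
    pvSet2 t i j true
  else pvKLoop i j (List.range' i (j - i)) t

-- for i in range(n - length + 1): ... (j = i + length - 1)
def pvILoop (cs : List Char) (L : Nat) : List Nat → List (List Bool) → List (List Bool)
  | [], t => t
  | i :: rest, t => pvILoop cs L rest (pvBody cs t i (i + L - 1))

-- for length in range(3, n+1)
def pvLLoop (cs : List Char) (n : Nat) : List Nat → List (List Bool) → List (List Bool)
  | [], t => t
  | L :: rest, t => pvLLoop cs n rest (pvILoop cs L (List.range (n - L + 1)) t)

def checkValidString_dp (s : String) : Bool :=
  let cs := s.toList
  let n := cs.length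
  if n = 0 then true
  else
    let dp0 := List.replicate n (List.replicate n false)
    let dp1 := pvLoop1 cs (List.range n) dp0
    let dp2 := pvLoop2 cs (List.range (n - 1)) dp1
    let dp3 := pvLLoop cs n (List.range' 3 (n + 1 - 3)) dp2
    pvGet2 dp3 0 (n - 1)

-- ===== PORT B =====
-- one pass; early `return False` becomes returning false from the recursion
def pvBLoop : List Char → Int → Int → Bool
  | [], lo, _ => lo == 0
  | c :: rest, lo, hi =>
    if c == '(' then (if hi + 1 < 0 then false else pvBLoop rest (max (lo + 1) 0) (hi + 1))
    else if c == ')' then (if hi - 1 < 0 then false else pvBLoop rest (max (lo - 1) 0) (hi - 1))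
    else if c == '*' then (if hi + 1 < 0 then false else pvBLoop rest (max (lo - 1) 0) (hi + 1))
    else false

def checkValidString_dp_alt (s : String) : Bool := pvBLoop s.toList 0 0

-- ===== PRECONDITION & SPEC =====
def Spec_checkValidString_dp (s : String) (out : Bool) : Prop := out = checkValidString_dp_alt s
instance (s : String) (out : Bool) : Decidable (Spec_checkValidString_dp s out) := by unfold Spec_checkValidString_dp; infer_instance

-- ===== CLAIM (what is proved, stated in full; the proofs are below) =====
def Claim_equal_checkValidString_dp : Prop := ∀ (s : String), Dom_checkValidString_dp s → Spec_checkValidString_dp s (checkValidString_dp s)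

-- ===== LEMMAS AND PROOFS =====
set_option maxRecDepth 10000

-- Semantic reference: a '*' may count -1, 0 or +1; pvAch s c k = "starting with open count c,
-- some choice of deltas keeps every running count ≥ 0 and ends at k".
def pvDeltas (c : Char) : List Int :=
  if c == '(' then [1] else if c == ')' then [-1] else if c == '*' then [-1, 0, 1] else []

def pvAch : List Char → Int → Int → Bool
  | [], c, k => k == c
  | x :: rest, c, k => (pvDeltas x).any fun d => decide (0 ≤ c + d) && pvAch rest (c + d) k

-- explicit traces
def pvTrace : List Char → List Int → Int → Int → Prop
  | [], [], c, k => k = c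
  | x :: s, d :: ds, c, k => d ∈ pvDeltas x ∧ 0 ≤ c + d ∧ pvTrace s ds (c + d) k
  | _ :: _, [], _, _ => False
  | [], _ :: _, _, _ => False

theorem pvAch_iff_trace : ∀ (s : List Char) (c k : Int), pvAch s c k = true ↔ ∃ ds, pvTrace s ds c k := by
  intro s
  induction s with
  | nil =>
    intro c k
    constructor
    · intro h
      exact ⟨[], by simpa [pvAch, pvTrace] using h⟩
    · rintro ⟨ds, h⟩
      cases ds with
      | nil => simpa [pvAch, pvTrace] using h
      | cons d ds => exact absurd h (by simp [pvTrace])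
  | cons x s ih =>
    intro c k
    constructor
    · intro h
      simp only [pvAch, List.any_eq_true] at h
      obtain ⟨d, hd, h2⟩ := h
      rw [Bool.and_eq_true, decide_eq_true_iff] at h2
      obtain ⟨ds, ht⟩ := (ih (c + d) k).mp h2.2
      exact ⟨d :: ds, hd, h2.1, ht⟩
    · rintro ⟨ds, h⟩
      cases ds with
      | nil => exact absurd h (by simp [pvTrace])
      | cons d ds =>
        obtain ⟨hd, hnn, ht⟩ := h
        simp only [pvAch, List.any_eq_true]
        refine ⟨d, hd, ?_⟩
        rw [Bool.and_eq_true, decide_eq_true_iff]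
        exact ⟨hnn, (ih _ _).mpr ⟨ds, ht⟩⟩

theorem pvTrace_length : ∀ (s : List Char) (ds : List Int) (c k : Int), pvTrace s ds c k → ds.length = s.length := by
  intro s
  induction s with
  | nil => intro ds c k h; cases ds with
    | nil => rfl
    | cons d ds => exact absurd h (by simp [pvTrace])
  | cons x s ih =>
    intro ds c k h
    cases ds with
    | nil => exact absurd h (by simp [pvTrace])
    | cons d ds => simpa using ih ds (c + d) k h.2.2

theorem pvTrace_append : ∀ (s t : List Char) (ds es : List Int) (c m k : Int),
    pvTrace s ds c m → pvTrace t es m k → pvTrace (s ++ t) (ds ++ es) c k := by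
  intro s
  induction s with
  | nil =>
    intro t ds es c m k h1 h2
    cases ds with
    | nil => simpa [pvTrace] using (show m = c from h1) ▸ h2
    | cons d ds => exact absurd h1 (by simp [pvTrace])
  | cons x s ih =>
    intro t ds es c m k h1 h2
    cases ds with
    | nil => exact absurd h1 (by simp [pvTrace])
    | cons d ds =>
      obtain ⟨hd, hnn, ht⟩ := h1
      exact ⟨hd, hnn, ih t ds es (c + d) m k ht h2⟩

theorem pvAch_append : ∀ (s t : List Char) (c k : Int),
    pvAch (s ++ t) c k = true ↔ ∃ m, pvAch s c m = true ∧ pvAch t m k = true := by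
  intro s
  induction s with
  | nil =>
    intro t c k
    constructor
    · intro h; exact ⟨c, by simp [pvAch], by simpa using h⟩
    · rintro ⟨m, hm, ht⟩
      have : m = c := by simpa [pvAch] using hm
      simpa [this] using ht
  | cons x s ih =>
    intro t c k
    simp only [List.cons_append, pvAch, List.any_eq_true, Bool.and_eq_true, decide_eq_true_iff]
    constructor
    · rintro ⟨d, hd, hnn, h⟩
      obtain ⟨m, h1, h2⟩ := (ih t (c + d) k).mp h
      exact ⟨m, ⟨d, hd, hnn, h1⟩, h2⟩
    · rintro ⟨m, ⟨d, hd, hnn, h1⟩, h2⟩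
      exact ⟨d, hd, hnn, (ih t (c + d) k).mpr ⟨m, h1, h2⟩⟩

theorem pvAch_shift : ∀ (s : List Char) (c k e : Int), 0 ≤ e → pvAch s c k = true → pvAch s (c + e) (k + e) = true := by
  intro s
  induction s with
  | nil =>
    intro c k e he h
    have : k = c := by simpa [pvAch] using h
    simp [pvAch, this]
  | cons x s ih =>
    intro c k e he h
    simp only [pvAch, List.any_eq_true, Bool.and_eq_true, decide_eq_true_iff] at h ⊢
    obtain ⟨d, hd, hnn, h⟩ := h
    refine ⟨d, hd, by omega, ?_⟩
    have := ih (c + d) k e he h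
    have heq : c + d + e = c + e + d := by ring
    rwa [heq] at this

theorem pvTrace_splitAt : ∀ (p : Nat) (s : List Char) (ds : List Int) (c k : Int),
    pvTrace s ds c k →
    pvTrace (s.take p) (ds.take p) c (c + (ds.take p).sum) ∧
      pvTrace (s.drop p) (ds.drop p) (c + (ds.take p).sum) k := by
  intro p
  induction p with
  | zero =>
    intro s ds c k h
    simp only [List.take_zero, List.drop_zero, List.sum_nil, add_zero]
    exact ⟨rfl, h⟩
  | succ p ih =>
    intro s ds c k h
    cases s with
    | nil =>
      cases ds with
      | nil =>
        simp only [List.take_nil, List.drop_nil, List.sum_nil, add_zero]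
        exact ⟨rfl, h⟩
      | cons d ds => exact absurd h (by simp [pvTrace])
    | cons x s =>
      cases ds with
      | nil => exact absurd h (by simp [pvTrace])
      | cons d ds =>
        obtain ⟨hd, hnn, ht⟩ := h
        obtain ⟨h1, h2⟩ := ih s ds (c + d) k ht
        simp only [List.take_succ_cons, List.drop_succ_cons, List.sum_cons]
        have heq : c + (d + (ds.take p).sum) = c + d + (ds.take p).sum := by ring
        rw [heq]
        exact ⟨⟨hd, hnn, h1⟩, h2⟩

theorem pvTrace_final_nonneg : ∀ (s : List Char) (ds : List Int) (c k : Int),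
    pvTrace s ds c k → 0 ≤ c → 0 ≤ k := by
  intro s
  induction s with
  | nil =>
    intro ds c k h hc
    cases ds with
    | nil => have : k = c := h; omega
    | cons d ds => exact absurd h (by simp [pvTrace])
  | cons x s ih =>
    intro ds c k h hc
    cases ds with
    | nil => exact absurd h (by simp [pvTrace])
    | cons d ds => exact ih ds (c + d) k h.2.2 h.2.1

theorem pvTrace_prefix_nonneg : ∀ (s : List Char) (ds : List Int) (c k : Int),
    pvTrace s ds c k → 0 ≤ c → ∀ p, 0 ≤ c + ((ds.take p).sum) := by
  intro s ds c k h hc p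
  obtain ⟨h1, _⟩ := pvTrace_splitAt p s ds c k h
  exact pvTrace_final_nonneg _ _ _ _ h1 hc

theorem pvTrace_down : ∀ (s : List Char) (ds : List Int) (c k : Int),
    pvTrace s ds c k → (∀ p, p ≤ s.length → 1 ≤ c + ((ds.take p).sum)) →
    pvTrace s ds (c - 1) (k - 1) := by
  intro s
  induction s with
  | nil =>
    intro ds c k h hp
    cases ds with
    | nil => have : k = c := h; show (k - 1 : Int) = c - 1; omega
    | cons d ds => exact absurd h (by simp [pvTrace])
  | cons x s ih =>
    intro ds c k h hp
    cases ds with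
    | nil => exact absurd h (by simp [pvTrace])
    | cons d ds =>
      obtain ⟨hd, hnn, ht⟩ := h
      have h1 : 1 ≤ c + d := by
        have := hp 1 (by simp)
        simpa using this
      refine ⟨hd, by omega, ?_⟩
      have : pvTrace s ds (c + d - 1) (k - 1) := by
        refine ih ds (c + d) k ht ?_
        intro q hq
        have := hp (q + 1) (by simpa using hq)
        simpa [add_assoc] using this
      have heq : c - 1 + d = c + d - 1 := by ring
      rwa [heq]

theorem pvMem_deltas_one : ∀ c : Char, (1 : Int) ∈ pvDeltas c ↔ pvOpenC c = true := by
  intro c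
  by_cases h1 : c = '(' 
  · subst h1; decide
  by_cases h2 : c = ')'
  · subst h2; decide
  by_cases h3 : c = '*'
  · subst h3; decide
  simp [pvDeltas, pvOpenC, h1, h2, h3]

theorem pvMem_deltas_negone : ∀ c : Char, (-1 : Int) ∈ pvDeltas c ↔ pvCloseC c = true := by
  intro c
  by_cases h1 : c = '(' 
  · subst h1; decide
  by_cases h2 : c = ')'
  · subst h2; decide
  by_cases h3 : c = '*'
  · subst h3; decide
  simp [pvDeltas, pvCloseC, h1, h2, h3]

theorem pvMem_deltas_zero : ∀ c : Char, (0 : Int) ∈ pvDeltas c ↔ pvStar c = true := by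
  intro c
  by_cases h1 : c = '(' 
  · subst h1; decide
  by_cases h2 : c = ')'
  · subst h2; decide
  by_cases h3 : c = '*'
  · subst h3; decide
  simp [pvDeltas, pvStar, h1, h2, h3]

theorem pvMem_deltas_cases : ∀ (c : Char) (d : Int), d ∈ pvDeltas c → d = -1 ∨ d = 0 ∨ d = 1 := by
  intro c d hd
  by_cases h1 : c = '(' 
  · subst h1; simp [pvDeltas] at hd; omega
  by_cases h2 : c = ')'
  · subst h2; simp [pvDeltas] at hd; omega
  by_cases h3 : c = '*'
  · subst h3; simp [pvDeltas] at hd; rcases hd with h | h | h <;> omega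
  simp [pvDeltas, h1, h2, h3] at hd

theorem pvAch_single : ∀ c : Char, pvAch [c] 0 0 = pvStar c := by
  intro c
  by_cases h1 : c = '(' 
  · subst h1; decide
  by_cases h2 : c = ')'
  · subst h2; decide
  by_cases h3 : c = '*'
  · subst h3; decide
  simp [pvAch, pvDeltas, pvStar, h1, h2, h3]


theorem pvAch_cons_par : ∀ (rest : List Char) (c k : Int),
    pvAch ('(' :: rest) c k = (decide (0 ≤ c + 1) && pvAch rest (c + 1) k) := by
  intro rest c k; simp [pvAch, pvDeltas]

theorem pvAch_cons_close : ∀ (rest : List Char) (c k : Int),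
    pvAch (')' :: rest) c k = (decide (0 ≤ c - 1) && pvAch rest (c - 1) k) := by
  intro rest c k
  have h : c + (-1 : Int) = c - 1 := by ring
  simp [pvAch, pvDeltas, h]

theorem pvAch_cons_star : ∀ (rest : List Char) (c k : Int),
    pvAch ('*' :: rest) c k = true ↔
      ∃ d : Int, (d = -1 ∨ d = 0 ∨ d = 1) ∧ 0 ≤ c + d ∧ pvAch rest (c + d) k = true := by
  intro rest c k
  simp only [pvAch, pvDeltas, List.any_eq_true, Bool.and_eq_true, decide_eq_true_iff]
  constructor
  · rintro ⟨d, hd, h1, h2⟩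
    refine ⟨d, ?_, h1, h2⟩
    simpa using hd
  · rintro ⟨d, hd, h1, h2⟩
    exact ⟨d, by simpa using hd, h1, h2⟩

theorem pvAch_cons_other : ∀ (x : Char) (rest : List Char) (c k : Int),
    x ≠ '(' → x ≠ ')' → x ≠ '*' → pvAch (x :: rest) c k = false := by
  intro x rest c k h1 h2 h3
  simp [pvAch, pvDeltas, h1, h2, h3]

-- ===== greedy side =====
theorem pvBLoop_iff : ∀ (cs : List Char) (lo hi : Int), 0 ≤ lo → lo ≤ hi →
    (pvBLoop cs lo hi = true ↔ ∃ c, lo ≤ c ∧ c ≤ hi ∧ pvAch cs c 0 = true) := by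
  intro cs
  induction cs with
  | nil =>
    intro lo hi h0 hlh
    simp only [pvBLoop, pvAch, beq_iff_eq]
    constructor
    · intro h; exact ⟨0, by omega, by omega, rfl⟩
    · rintro ⟨c, h1, h2, h3⟩; omega
  | cons x rest ih =>
    intro lo hi h0 hlh
    by_cases hx1 : x = '('
    · subst hx1
      have e1 : pvBLoop ('(' :: rest) lo hi
          = (if hi + 1 < 0 then false else pvBLoop rest (max (lo + 1) 0) (hi + 1)) := by
        simp [pvBLoop]
      rw [e1, if_neg (by omega), show max (lo + 1) 0 = lo + 1 by omega]
      rw [ih (lo + 1) (hi + 1) (by omega) (by omega)]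
      constructor
      · rintro ⟨c, h1, h2, h3⟩
        refine ⟨c - 1, by omega, by omega, ?_⟩
        rw [pvAch_cons_par, Bool.and_eq_true, decide_eq_true_iff]
        exact ⟨by omega, by rw [show c - 1 + 1 = c by ring]; exact h3⟩
      · rintro ⟨c, h1, h2, h3⟩
        rw [pvAch_cons_par, Bool.and_eq_true, decide_eq_true_iff] at h3
        exact ⟨c + 1, by omega, by omega, h3.2⟩
    · by_cases hx2 : x = ')'
      · subst hx2
        have e1 : pvBLoop (')' :: rest) lo hi
            = (if hi - 1 < 0 then false else pvBLoop rest (max (lo - 1) 0) (hi - 1)) := by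
          simp [pvBLoop]
        by_cases hneg : hi - 1 < 0
        · rw [e1, if_pos hneg]
          constructor
          · intro h; exact absurd h (by simp)
          · rintro ⟨c, h1, h2, h3⟩
            rw [pvAch_cons_close, Bool.and_eq_true, decide_eq_true_iff] at h3
            omega
        · rw [e1, if_neg hneg]
          rw [ih (max (lo - 1) 0) (hi - 1) (by omega) (by omega)]
          constructor
          · rintro ⟨c, h1, h2, h3⟩
            refine ⟨c + 1, by omega, by omega, ?_⟩
            rw [pvAch_cons_close, Bool.and_eq_true, decide_eq_true_iff]
            exact ⟨by omega, by rw [show c + 1 - 1 = c by ring]; exact h3⟩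
          · rintro ⟨c, h1, h2, h3⟩
            rw [pvAch_cons_close, Bool.and_eq_true, decide_eq_true_iff] at h3
            exact ⟨c - 1, by omega, by omega, h3.2⟩
      · by_cases hx3 : x = '*'
        · subst hx3
          have e1 : pvBLoop ('*' :: rest) lo hi
              = (if hi + 1 < 0 then false else pvBLoop rest (max (lo - 1) 0) (hi + 1)) := by
            simp [pvBLoop]
          rw [e1, if_neg (by omega)]
          rw [ih (max (lo - 1) 0) (hi + 1) (by omega) (by omega)]
          constructor
          · rintro ⟨c, h1, h2, h3⟩
            by_cases hcl : c < lo
            · refine ⟨lo, le_refl _, hlh, ?_⟩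
              rw [pvAch_cons_star]
              refine ⟨-1, Or.inl rfl, by omega, ?_⟩
              rw [show lo + (-1 : Int) = c by omega]; exact h3
            · by_cases hch : hi < c
              · refine ⟨hi, hlh, le_refl _, ?_⟩
                rw [pvAch_cons_star]
                refine ⟨1, by tauto, by omega, ?_⟩
                rw [show hi + (1 : Int) = c by omega]; exact h3
              · refine ⟨c, by omega, by omega, ?_⟩
                rw [pvAch_cons_star]
                refine ⟨0, by tauto, by omega, ?_⟩
                rw [show c + (0 : Int) = c by ring]; exact h3
          · rintro ⟨c, h1, h2, h3⟩
            rw [pvAch_cons_star] at h3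
            obtain ⟨d, hd, hnn, hach⟩ := h3
            exact ⟨c + d, by omega, by omega, hach⟩
        · have e1 : pvBLoop (x :: rest) lo hi = false := by
            simp [pvBLoop, hx1, hx2, hx3]
          rw [e1]
          constructor
          · intro h; exact absurd h (by simp)
          · rintro ⟨c, h1, h2, h3⟩
            rw [pvAch_cons_other x rest c 0 hx1 hx2 hx3] at h3
            exact absurd h3 (by simp)

-- ===== recursive functional form of A's DP =====
def pvDpF (cs : List Char) : Nat → Nat → Nat → Bool
  | 0, _, _ => false
  | f + 1, i, j =>
    if i = j then pvStar (cs.getD i ' ')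
    else
      (pvStar (cs.getD i ' ') && pvDpF cs f (i + 1) j)
      || ((pvOpenC (cs.getD i ' ') && pvCloseC (cs.getD j ' ')) && ((j == i + 1) || pvDpF cs f (i + 1) (j - 1)))
      || (List.range' i (j - i)).any fun k => pvDpF cs f i k && pvDpF cs f (k + 1) j

theorem pvAnyCongr {α : Type} : ∀ (l : List α) (p q : α → Bool), (∀ a ∈ l, p a = q a) → l.any p = l.any q := by
  intro l p q h
  induction l with
  | nil => rfl
  | cons a l ih => simp only [List.any_cons, h a (by simp), ih fun b hb => h b (by simp [hb])]

theorem pvDpF_gt : ∀ (cs : List Char) (f i j : Nat), j < i → pvDpF cs f i j = false := by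
  intro cs f
  induction f with
  | zero => intro i j h; rfl
  | succ f ih =>
    intro i j h
    have hij : i ≠ j := by omega
    have hb : (j == i + 1) = false := by simp; omega
    have hr : j - i = 0 := by omega
    simp only [pvDpF, if_neg hij, hb, hr, List.range', List.any_nil,
      ih (i+1) j (by omega), ih (i+1) (j-1) (by omega)]
    simp

theorem pvDpF_succ : ∀ (cs : List Char) (f i j : Nat), j - i < f → pvDpF cs f i j = pvDpF cs (f + 1) i j := by
  intro cs f
  induction f with
  | zero => intro i j h; exact absurd h (by omega)
  | succ f ih =>
    intro i j h
    by_cases hij : i = j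
    · simp [pvDpF, hij]
    rcases Nat.lt_or_ge i j with hlt | hge
    · have hf : 1 ≤ f := by omega
      conv_lhs => rw [pvDpF]
      conv_rhs => rw [pvDpF]
      simp only [if_neg hij]
      rw [ih (i+1) j (by omega), ih (i+1) (j-1) (by omega)]
      have hany : ((List.range' i (j - i)).any fun k => pvDpF cs f i k && pvDpF cs f (k+1) j)
          = ((List.range' i (j - i)).any fun k => pvDpF cs (f+1) i k && pvDpF cs (f+1) (k+1) j) := by
        apply pvAnyCongr
        intro k hk
        rw [List.mem_range'_1] at hk
        rw [ih i k (by omega), ih (k+1) j (by omega)]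
      rw [hany]
    · have hj : j < i := by omega
      rw [pvDpF_gt cs (f+1) i j hj, pvDpF_gt cs (f+2) i j hj]

theorem pvDpF_stable : ∀ (cs : List Char) (f g i j : Nat), j - i < f → f ≤ g → pvDpF cs f i j = pvDpF cs g i j := by
  intro cs f g i j h hle
  induction g, hle using Nat.le_induction with
  | base => rfl
  | succ g hg ih => rw [ih, pvDpF_succ cs g i j (by omega)]

def pvSlice (cs : List Char) (i m : Nat) : List Char := (cs.drop i).take m

theorem pvSlice_cons : ∀ (cs : List Char) (i m : Nat), i < cs.length →
    pvSlice cs i (m + 1) = cs.getD i ' ' :: pvSlice cs (i + 1) m := by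
  intro cs i m h
  have hd : cs.getD i ' ' = cs[i] := by
    rw [List.getD_eq_getElem?_getD, List.getElem?_eq_getElem h]; rfl
  rw [pvSlice, List.drop_eq_getElem_cons h, List.take_succ_cons, hd, pvSlice]

theorem pvSlice_snoc : ∀ (cs : List Char) (i m : Nat), i + m < cs.length →
    pvSlice cs i (m + 1) = pvSlice cs i m ++ [cs.getD (i + m) ' '] := by
  intro cs i m h
  have hi : i ≤ cs.length := by omega
  have hm : m < (cs.drop i).length := by simp; omega
  have hd : cs.getD (i + m) ' ' = cs[i + m] := by
    rw [List.getD_eq_getElem?_getD, List.getElem?_eq_getElem h]; rfl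
  rw [pvSlice, List.take_add_one, pvSlice, hd]
  congr 1
  rw [List.getElem?_drop, List.getElem?_eq_getElem h]
  rfl

theorem pvSlice_split : ∀ (cs : List Char) (i m p : Nat), p ≤ m →
    pvSlice cs i m = pvSlice cs i p ++ pvSlice cs (i + p) (m - p) := by
  intro cs i m p h
  rw [pvSlice, show m = p + (m - p) by omega, List.take_add, pvSlice, pvSlice, List.drop_drop]
  congr 2
  all_goals omega

theorem pvSlice_length : ∀ (cs : List Char) (i m : Nat), i + m ≤ cs.length → (pvSlice cs i m).length = m := by
  intro cs i m h
  simp [pvSlice]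
  omega

theorem pvSlice_take : ∀ (cs : List Char) (a m p : Nat), p ≤ m →
    (pvSlice cs a m).take p = pvSlice cs a p := by
  intro cs a m p h
  rw [pvSlice, pvSlice, List.take_take, min_eq_left h]

theorem pvSlice_drop : ∀ (cs : List Char) (a m p : Nat),
    (pvSlice cs a m).drop p = pvSlice cs (a + p) (m - p) := by
  intro cs a m p
  rw [pvSlice, pvSlice, List.drop_take, List.drop_drop]

theorem pvAch_wrap : ∀ (a b : Char) (mid : List Char),
    pvOpenC a = true → pvCloseC b = true → pvAch mid 0 0 = true →
    pvAch (a :: (mid ++ [b])) 0 0 = true := by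
  intro a b mid ho hc hm
  show ((pvDeltas a).any fun d => decide (0 ≤ (0:Int) + d) && pvAch (mid ++ [b]) ((0:Int) + d) 0) = true
  rw [List.any_eq_true]
  refine ⟨1, (pvMem_deltas_one a).mpr ho, ?_⟩
  rw [Bool.and_eq_true, decide_eq_true_iff]
  refine ⟨by norm_num, ?_⟩
  rw [pvAch_append]
  refine ⟨1, ?_, ?_⟩
  · have := pvAch_shift mid 0 0 1 (by norm_num) hm
    simpa using this
  · show ((pvDeltas b).any fun d => decide (0 ≤ (1:Int) + d) && pvAch [] ((1:Int) + d) 0) = true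
    rw [List.any_eq_true]
    refine ⟨-1, (pvMem_deltas_negone b).mpr hc, ?_⟩
    rw [Bool.and_eq_true, decide_eq_true_iff]
    constructor
    · norm_num
    · show ((0:Int) == 1 + -1) = true
      norm_num

theorem pvDpF_diag : ∀ (cs : List Char) (f i : Nat), pvDpF cs (f + 1) i i = pvStar (cs.getD i ' ') := by
  intro cs f i
  simp [pvDpF]

-- the central semantic lemma: A's DP value on s[i..i+span] is exactly achievability
theorem pvDpF_ach : ∀ (cs : List Char) (span i : Nat), i + span < cs.length →
    (pvDpF cs (span + 1) i (i + span) = true ↔ pvAch (pvSlice cs i (span + 1)) 0 0 = true) := by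
  intro cs span
  induction span using Nat.strong_induction_on with
  | _ span IH =>
  intro i hin
  rcases Nat.eq_zero_or_pos span with hs0 | hspos
  · subst hs0
    have h1 : pvDpF cs (0 + 1) i (i + 0) = pvStar (cs.getD i ' ') := pvDpF_diag cs 0 i
    rw [h1, pvSlice_cons cs i 0 (by omega), show pvSlice cs (i+1) 0 = [] from rfl, pvAch_single]
  · constructor
    · -- dpF → ach
      intro h
      rw [pvDpF, if_neg (by omega), Bool.or_eq_true, Bool.or_eq_true] at h
      rcases h with (h | h) | h
      · -- star rule
        rw [Bool.and_eq_true] at h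
        obtain ⟨hst, hrec⟩ := h
        have hrec' : pvDpF cs (span - 1 + 1) (i+1) ((i+1) + (span-1)) = true := by
          rw [show span - 1 + 1 = span by omega, show (i+1) + (span-1) = i + span by omega]
          exact hrec
        have hach := (IH (span-1) (by omega) (i+1) (by omega)).mp hrec'
        rw [show span - 1 + 1 = span by omega] at hach
        rw [pvSlice_cons cs i span (by omega)]
        show ((pvDeltas (cs.getD i ' ')).any
          fun d => decide (0 ≤ (0:Int) + d) && pvAch (pvSlice cs (i+1) span) ((0:Int) + d) 0) = true
        rw [List.any_eq_true]
        refine ⟨0, (pvMem_deltas_zero _).mpr hst, ?_⟩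
        rw [Bool.and_eq_true, decide_eq_true_iff]
        exact ⟨by norm_num, by simpa using hach⟩
      · -- pair rule
        rw [Bool.and_eq_true] at h
        obtain ⟨hoc, hrest⟩ := h
        rw [Bool.and_eq_true] at hoc
        obtain ⟨ho, hc⟩ := hoc
        rw [Bool.or_eq_true] at hrest
        rcases hrest with hj1 | hinner
        · -- span = 1
          have hsp1 : span = 1 := by
            have : i + span = i + 1 := by simpa using hj1
            omega
          subst hsp1
          rw [pvSlice_cons cs i 1 (by omega), pvSlice_cons cs (i+1) 0 (by omega),
            show pvSlice cs (i+2) 0 = [] from rfl]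
          have := pvAch_wrap (cs.getD i ' ') (cs.getD (i+1) ' ') [] ho (by simpa using hc) (by rfl)
          simpa using this
        · -- inner dp true
          have hsp2 : 2 ≤ span := by
            by_contra hlt
            have hsp1 : span = 1 := by omega
            rw [hsp1, show i + 1 - 1 = i by omega, pvDpF_gt cs 1 (i+1) i (by omega)] at hinner
            exact absurd hinner (by simp)
          have hinner' : pvDpF cs (span - 2 + 1) (i+1) ((i+1) + (span-2)) = true := by
            rw [show (i+1) + (span - 2) = i + span - 1 by omega,
              pvDpF_stable cs (span - 2 + 1) span (i+1) (i + span - 1) (by omega) (by omega)]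
            exact hinner
          have hach := (IH (span-2) (by omega) (i+1) (by omega)).mp hinner'
          rw [show span - 2 + 1 = span - 1 by omega] at hach
          rw [pvSlice_cons cs i span (by omega)]
          have hsnoc : pvSlice cs (i+1) span
              = pvSlice cs (i+1) (span - 1) ++ [cs.getD (i + span) ' '] := by
            conv_lhs => rw [show span = (span - 1) + 1 by omega]
            rw [pvSlice_snoc cs (i+1) (span-1) (by omega), show i + 1 + (span - 1) = i + span by omega]
          rw [hsnoc]
          exact pvAch_wrap _ _ _ ho hc hach
      · -- split rule
        rw [List.any_eq_true] at h
        obtain ⟨k, hk, hkv⟩ := h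
        rw [List.mem_range'_1] at hk
        rw [Bool.and_eq_true] at hkv
        obtain ⟨h1, h2⟩ := hkv
        have h1' : pvDpF cs (k - i + 1) i (i + (k - i)) = true := by
          rw [show i + (k - i) = k by omega,
            pvDpF_stable cs (k - i + 1) span i k (by omega) (by omega)]
          exact h1
        have h2' : pvDpF cs ((i + span - (k+1)) + 1) (k+1) ((k+1) + (i + span - (k+1))) = true := by
          rw [show (k+1) + (i + span - (k+1)) = i + span by omega,
            pvDpF_stable cs ((i + span - (k+1)) + 1) span (k+1) (i + span) (by omega) (by omega)]
          exact h2
        have hach1 := (IH (k - i) (by omega) i (by omega)).mp h1'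
        have hach2 := (IH (i + span - (k+1)) (by omega) (k+1) (by omega)).mp h2'
        rw [pvSlice_split cs i (span+1) (k - i + 1) (by omega),
          show i + (k - i + 1) = k + 1 by omega,
          show span + 1 - (k - i + 1) = (i + span - (k+1)) + 1 by omega,
          pvAch_append]
        exact ⟨0, hach1, hach2⟩
    · -- ach → dpF
      intro h
      by_cases hsplit : ∃ p, 1 ≤ p ∧ p ≤ span ∧ pvAch (pvSlice cs i p) 0 0 = true ∧
          pvAch (pvSlice cs (i+p) (span + 1 - p)) 0 0 = true
      · -- a split exists: use the k-loop disjunct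
        obtain ⟨p, hp1, hp2, ha1, ha2⟩ := hsplit
        have hd1 : pvDpF cs (span+1) i (i + (p-1)) = true := by
          rw [← pvDpF_stable cs ((p-1)+1) (span+1) i (i + (p-1)) (by omega) (by omega)]
          exact (IH (p-1) (by omega) i (by omega)).mpr
            (by rw [show p - 1 + 1 = p by omega]; exact ha1)
        have hd2 : pvDpF cs (span+1) (i+p) ((i+p) + (span - p)) = true := by
          rw [← pvDpF_stable cs ((span-p)+1) (span+1) (i+p) ((i+p)+(span-p)) (by omega) (by omega)]
          exact (IH (span - p) (by omega) (i+p) (by omega)).mpr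
            (by rw [show span - p + 1 = span + 1 - p by omega]; exact ha2)
        rw [pvDpF, if_neg (by omega)]
        have hC : ((List.range' i (i + span - i)).any
            fun k => pvDpF cs span i k && pvDpF cs span (k+1) (i+span)) = true := by
          rw [List.any_eq_true]
          refine ⟨i + (p-1), by rw [List.mem_range'_1]; omega, ?_⟩
          rw [Bool.and_eq_true]
          constructor
          · rw [pvDpF_succ cs span i (i + (p-1)) (by omega)]
            exact hd1
          · rw [pvDpF_succ cs span (i + (p-1) + 1) (i+span) (by omega),
              show i + (p-1) + 1 = i + p by omega,
              show i + span = (i+p) + (span - p) by omega]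
            exact hd2
        rw [hC]
        simp
      · -- no split point
        rw [pvSlice_cons cs i span (by omega)] at h
        obtain ⟨ds, htr⟩ := (pvAch_iff_trace _ 0 0).mp h
        cases ds with
        | nil => exact absurd htr (by simp [pvTrace])
        | cons d ds' =>
        obtain ⟨hd, hnn, htr'⟩ := htr
        have hdcases := pvMem_deltas_cases _ _ hd
        have hd1 : d = 1 := by
          rcases (by omega : d = 0 ∨ d = 1) with h0 | h1
          · exfalso
            apply hsplit
            refine ⟨1, le_refl _, by omega, ?_, ?_⟩
            · rw [pvSlice_cons cs i 0 (by omega), show pvSlice cs (i+1) 0 = [] from rfl,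
                pvAch_single]
              exact (pvMem_deltas_zero _).mp (h0 ▸ hd)
            · refine (pvAch_iff_trace _ 0 0).mpr ⟨ds', ?_⟩
              have : (0:Int) + d = 0 := by omega
              rwa [this] at htr'
          · exact h1
        subst hd1
        have hopen : pvOpenC (cs.getD i ' ') = true := (pvMem_deltas_one _).mp hd
        rw [show (0:Int) + 1 = 1 from by norm_num] at htr'
        have hsnoc : pvSlice cs (i+1) span
            = pvSlice cs (i+1) (span - 1) ++ [cs.getD (i + span) ' '] := by
          conv_lhs => rw [show span = (span - 1) + 1 by omega]
          rw [pvSlice_snoc cs (i+1) (span-1) (by omega), show i + 1 + (span - 1) = i + span by omega]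
        rw [hsnoc] at htr'
        have hmidlen : (pvSlice cs (i+1) (span-1)).length = span - 1 :=
          pvSlice_length cs (i+1) (span-1) (by omega)
        have hdslen : ds'.length = span := by
          have := pvTrace_length _ _ _ _ htr'
          rw [List.length_append, hmidlen] at this
          simp at this
          omega
        obtain ⟨htm, hte⟩ := pvTrace_splitAt (span - 1) _ _ _ _ htr'
        have e1 : (pvSlice cs (i+1) (span-1) ++ [cs.getD (i + span) ' ']).take (span-1)
            = pvSlice cs (i+1) (span-1) := by
          have t := List.take_left (l₁ := pvSlice cs (i+1) (span-1)) (l₂ := [cs.getD (i + span) ' '])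
          rwa [hmidlen] at t
        have e2 : (pvSlice cs (i+1) (span-1) ++ [cs.getD (i + span) ' ']).drop (span-1)
            = [cs.getD (i + span) ' '] := by
          have t := List.drop_left (l₁ := pvSlice cs (i+1) (span-1)) (l₂ := [cs.getD (i + span) ' '])
          rwa [hmidlen] at t
        rw [e1] at htm
        rw [e2] at hte
        obtain ⟨e, he⟩ : ∃ e, ds'.drop (span-1) = [e] := by
          have hlen2 : (ds'.drop (span-1)).length = 1 := by
            rw [List.length_drop, hdslen]
            omega
          cases hq : ds'.drop (span-1) with
          | nil => rw [hq] at hlen2; simp at hlen2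
          | cons a l =>
            cases l with
            | nil => exact ⟨a, rfl⟩
            | cons b l2 => rw [hq] at hlen2; simp at hlen2
        rw [he] at hte
        obtain ⟨hedel, henn, hefin⟩ := hte
        have hMnn : (0:Int) ≤ 1 + (ds'.take (span-1)).sum :=
          pvTrace_final_nonneg _ _ _ _ htm (by norm_num)
        have he3 := pvMem_deltas_cases _ _ hedel
        have hM1 : 1 + (ds'.take (span-1)).sum = 1 := by
          have hMe : (0:Int) = 1 + (ds'.take (span-1)).sum + e := hefin
          rcases (by omega : 1 + (ds'.take (span-1)).sum = 0 ∨ 1 + (ds'.take (span-1)).sum = 1) with hM | hM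
          · exfalso
            apply hsplit
            refine ⟨span, by omega, le_refl _, ?_, ?_⟩
            · have hcons : pvSlice cs i span = cs.getD i ' ' :: pvSlice cs (i+1) (span - 1) := by
                conv_lhs => rw [show span = (span - 1) + 1 by omega]
                exact pvSlice_cons cs i (span-1) (by omega)
              rw [hcons]
              refine (pvAch_iff_trace _ 0 0).mpr ⟨1 :: ds'.take (span-1), hd, by norm_num, ?_⟩
              rw [show (0:Int) + 1 = 1 from by norm_num]
              have := htm
              rwa [hM] at this
            · rw [show span + 1 - span = 1 by omega, pvSlice_cons cs (i+span) 0 (by omega),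
                show pvSlice cs (i+span+1) 0 = [] from rfl, pvAch_single]
              have he0 : e = 0 := by omega
              exact (pvMem_deltas_zero _).mp (he0 ▸ hedel)
          · exact hM
        have he1 : e = -1 := by
          have hMe : (0:Int) = 1 + (ds'.take (span-1)).sum + e := hefin
          omega
        have hclose : pvCloseC (cs.getD (i+span) ' ') = true :=
          (pvMem_deltas_negone _).mp (he1 ▸ hedel)
        rcases (by omega : span = 1 ∨ 2 ≤ span) with hsp | hsp
        · -- pair rule, adjacent
          rw [pvDpF, if_neg (by omega), hopen, hclose,
            show (i + span == i + 1) = true from by rw [hsp]; simp]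
          simp
        · -- inspect interior prefix sums of the middle trace
          by_cases hzero : ∃ p, 1 ≤ p ∧ p ≤ span - 2 ∧ (1:Int) + ((ds'.take (span-1)).take p).sum = 0
          · -- an interior zero gives a split: contradiction
            obtain ⟨p, hq1, hq2, hpz⟩ := hzero
            exfalso
            apply hsplit
            obtain ⟨htm1, htm2⟩ := pvTrace_splitAt p _ _ _ _ htm
            refine ⟨p + 1, by omega, by omega, ?_, ?_⟩
            · -- prefix c0 :: mid.take p
              have hcons : pvSlice cs i (p+1) = cs.getD i ' ' :: pvSlice cs (i+1) p :=
                pvSlice_cons cs i p (by omega)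
              rw [hcons]
              refine (pvAch_iff_trace _ 0 0).mpr
                ⟨1 :: (ds'.take (span-1)).take p, hd, by norm_num, ?_⟩
              rw [show (0:Int) + 1 = 1 from by norm_num]
              have htk : (pvSlice cs (i+1) (span-1)).take p = pvSlice cs (i+1) p :=
                pvSlice_take cs (i+1) (span-1) p (by omega)
              rw [htk] at htm1
              rwa [hpz] at htm1
            · -- suffix mid.drop p ++ [cj]
              have hdr : (pvSlice cs (i+1) (span-1)).drop p = pvSlice cs (i+1+p) (span-1-p) :=
                pvSlice_drop cs (i+1) (span-1) p
              rw [hdr, hpz, hM1] at htm2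
              have hte' : pvTrace [cs.getD (i+span) ' '] [e] 1 0 := by
                refine ⟨hedel, by omega, ?_⟩
                show (0:Int) = 1 + e
                omega
              have happ := pvTrace_append _ _ _ _ 0 1 0 htm2 hte'
              have hsl : pvSlice cs (i+(p+1)) (span + 1 - (p+1))
                  = pvSlice cs (i+1+p) (span-1-p) ++ [cs.getD (i+span) ' '] := by
                have hr1 : i + (p + 1) = i + 1 + p := by omega
                have hr2 : span + 1 - (p+1) = (span - 1 - p) + 1 := by omega
                rw [hr1, hr2, pvSlice_snoc cs (i+1+p) (span-1-p) (by omega),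
                  show i + 1 + p + (span - 1 - p) = i + span by omega]
              rw [hsl]
              exact (pvAch_iff_trace _ 0 0).mpr ⟨(ds'.take (span-1)).drop p ++ [e], happ⟩
          · -- no interior zero: all prefixes stay ≥ 1, shift the middle down
            have hdown : pvTrace (pvSlice cs (i+1) (span-1)) (ds'.take (span-1)) 0 0 := by
              have h1' := pvTrace_down _ _ _ _ htm ?_
              · have : (1:Int) - 1 = 0 := by norm_num
                rwa [this, show (1:Int) + (ds'.take (span-1)).sum - 1 = 0 by omega] at h1'
              · intro p hp
                rcases Nat.eq_zero_or_pos p with hp0 | hppos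
                · subst hp0; simp
                · rcases (by omega : p ≤ span - 2 ∨ p = span - 1) with hpi | hpe
                  · have hnn2 : (0:Int) ≤ 1 + ((ds'.take (span-1)).take p).sum :=
                      pvTrace_prefix_nonneg _ _ _ _ htm (by norm_num) p
                    have hne : ¬ ((1:Int) + ((ds'.take (span-1)).take p).sum = 0) := by
                      intro hcon
                      exact hzero ⟨p, by omega, hpi, hcon⟩
                    omega
                  · rw [hpe]
                    rw [show ((ds'.take (span-1)).take (span-1)) = ds'.take (span-1) from by
                      apply List.take_of_length_le
                      rw [List.length_take, hdslen]
                      omega]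
                    omega
            have hmul := (pvAch_iff_trace _ 0 0).mpr ⟨ds'.take (span-1), hdown⟩
            have hinner : pvDpF cs (span - 2 + 1) (i+1) ((i+1) + (span-2)) = true := by
              apply (IH (span-2) (by omega) (i+1) (by omega)).mpr
              rw [show span - 2 + 1 = span - 1 by omega]
              exact hmul
            rw [pvDpF, if_neg (by omega), hopen, hclose]
            have hin2 : pvDpF cs span (i+1) (i + span - 1) = true := by
              rw [← pvDpF_stable cs (span - 2 + 1) span (i+1) (i + span - 1) (by omega) (by omega),
                show i + span - 1 = (i+1) + (span - 2) by omega]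
              exact hinner
            rw [show i + span - 1 = i + span - 1 from rfl]
            rw [hin2]
            simp

-- ===== table correctness =====
def pvShape (n : Nat) (t : List (List Bool)) : Prop := t.length = n ∧ ∀ r ∈ t, r.length = n

theorem pvShape_set2 : ∀ (n : Nat) (t : List (List Bool)) (i j : Nat) (v : Bool),
    pvShape n t → pvShape n (pvSet2 t i j v) := by
  intro n t i j v h
  obtain ⟨hl, hr⟩ := h
  by_cases hi : i < t.length
  · constructor
    · simpa [pvSet2] using hl
    · intro r hmem
      rcases List.mem_or_eq_of_mem_set hmem with h1 | h1
      · exact hr r h1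
      · subst h1
        have : t.getD i [] = t[i] := by
          rw [List.getD_eq_getElem?_getD, List.getElem?_eq_getElem hi]; rfl
        rw [List.length_set, this]
        exact hr _ (List.getElem_mem hi)
  · rw [pvSet2, List.set_eq_of_length_le (by omega)]
    exact ⟨hl, hr⟩

theorem pvGet2_set2_self : ∀ (n : Nat) (t : List (List Bool)) (i j : Nat) (v : Bool),
    pvShape n t → i < n → j < n → pvGet2 (pvSet2 t i j v) i j = v := by
  intro n t i j v h hi hj
  obtain ⟨hl, hr⟩ := h
  have hit : i < t.length := by omega
  have hrow : t.getD i [] = t[i] := by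
    rw [List.getD_eq_getElem?_getD, List.getElem?_eq_getElem hit]; rfl
  have hjr : j < (t.getD i []).length := by
    rw [hrow]; rw [hr _ (List.getElem_mem hit)]; omega
  have router : (t.set i ((t.getD i []).set j v)).getD i [] = (t.getD i []).set j v := by
    rw [List.getD_eq_getElem?_getD, List.getElem?_set_self hit]; rfl
  rw [pvGet2, pvSet2, router]
  rw [List.getD_eq_getElem?_getD, List.getElem?_set_self (by simpa using hjr)]
  rfl

theorem pvGet2_set2_ne : ∀ (t : List (List Bool)) (i j i' j' : Nat) (v : Bool),
    i ≠ i' ∨ j ≠ j' → pvGet2 (pvSet2 t i j v) i' j' = pvGet2 t i' j' := by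
  intro t i j i' j' v h
  by_cases hii : i = i'
  · subst hii
    have hjj : j ≠ j' := by tauto
    rw [pvGet2, pvSet2, pvGet2]
    by_cases hit : i < t.length
    · have router : (t.set i ((t.getD i []).set j v)).getD i [] = (t.getD i []).set j v := by
        rw [List.getD_eq_getElem?_getD, List.getElem?_set_self hit]; rfl
      rw [router]
      rw [List.getD_eq_getElem?_getD, List.getElem?_set_ne hjj, List.getD_eq_getElem?_getD,
        List.getD_eq_getElem?_getD]
    · rw [List.set_eq_of_length_le (by omega)]
  · have router : (t.set i ((t.getD i []).set j v)).getD i' [] = t.getD i' [] := by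
      rw [List.getD_eq_getElem?_getD, List.getElem?_set_ne hii, List.getD_eq_getElem?_getD]
    rw [pvGet2, pvSet2, pvGet2, router]

def pvGood (cs : List Char) (n L : Nat) (t : List (List Bool)) : Prop :=
  pvShape n t ∧ ∀ i j, i < n → j < n →
    pvGet2 t i j = if i ≤ j ∧ j < i + L then pvDpF cs n i j else false

def pvGoodP (cs : List Char) (n L m : Nat) (t : List (List Bool)) : Prop :=
  pvShape n t ∧ ∀ i j, i < n → j < n →
    pvGet2 t i j = if i ≤ j ∧ (j < i + (L - 1) ∨ (j + 1 = i + L ∧ i < m)) then pvDpF cs n i j else false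

theorem pvGood_init : ∀ (cs : List Char) (n : Nat), pvGood cs n 0 (List.replicate n (List.replicate n false)) := by
  intro cs n
  constructor
  · constructor
    · simp
    · intro r hm
      rw [List.eq_of_mem_replicate hm]
      simp
  · intro i j hi hj
    rw [if_neg (by omega)]
    have r1 : (List.replicate n (List.replicate n false)).getD i [] = List.replicate n false := by
      rw [List.getD_eq_getElem?_getD, List.getElem?_replicate, if_pos hi]; rfl
    rw [pvGet2, r1, List.getD_eq_getElem?_getD, List.getElem?_replicate, if_pos hj]
    rfl

theorem pvDpF_len2 : ∀ (cs : List Char) (f i : Nat),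
    pvDpF cs (f + 2) i (i + 1) = (pvOpenC (cs.getD i ' ') && pvCloseC (cs.getD (i + 1) ' ')) := by
  intro cs f i
  conv_lhs => rw [pvDpF]
  rw [if_neg (by omega)]
  have h1 : pvDpF cs (f+1) (i+1) (i+1) = pvStar (cs.getD (i+1) ' ') := pvDpF_diag cs f (i+1)
  have h0 : pvDpF cs (f+1) i i = pvStar (cs.getD i ' ') := pvDpF_diag cs f i
  have hb : (i + 1 == i + 1) = true := by simp
  have hrange : List.range' i (i + 1 - i) = [i] := by
    rw [show i + 1 - i = 1 by omega]; rfl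
  rw [hb, hrange, show i + 1 - 1 = i by omega]
  simp only [List.any_cons, List.any_nil, h1, h0]
  cases hsi : pvStar (cs.getD i ' ') with
  | false => simp
  | true =>
    cases hsj : pvStar (cs.getD (i+1) ' ') with
    | true =>
      have ho : pvOpenC (cs.getD i ' ') = true := by
        rw [pvStar] at hsi; rw [pvOpenC, hsi]; simp
      have hc : pvCloseC (cs.getD (i+1) ' ') = true := by
        rw [pvStar] at hsj; rw [pvCloseC, hsj]; simp
      simp only [List.getD_eq_getElem?_getD] at ho hc ⊢
      simp [ho, hc]
    | false =>
      have ho : pvOpenC (cs.getD i ' ') = true := by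
        rw [pvStar] at hsi; rw [pvOpenC, hsi]; simp
      simp only [List.getD_eq_getElem?_getD] at ho ⊢
      simp [ho]

theorem pvLoop1_get : ∀ (cs : List Char) (n : Nat) (l : List Nat) (t : List (List Bool)),
    pvShape n t → (∀ x ∈ l, x < n) →
    pvShape n (pvLoop1 cs l t) ∧ ∀ i j, i < n → j < n →
      pvGet2 (pvLoop1 cs l t) i j =
        if i = j ∧ i ∈ l ∧ pvStar (cs.getD i ' ') = true then true else pvGet2 t i j := by
  intro cs n l
  induction l with
  | nil =>
    intro t hsh _
    exact ⟨hsh, fun i j hi hj => by rw [if_neg (by simp)]; rfl⟩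
  | cons a l ih =>
    intro t hsh hb
    have ha : a < n := hb a (by simp)
    have hsh' : pvShape n (if pvStar (cs.getD a ' ') then pvSet2 t a a true else t) := by
      split
      · exact pvShape_set2 n t a a true hsh
      · exact hsh
    obtain ⟨hsh2, hget⟩ := ih _ hsh' (fun x hx => hb x (by simp [hx]))
    refine ⟨hsh2, fun i j hi hj => ?_⟩
    rw [show pvLoop1 cs (a :: l) t = pvLoop1 cs l (if pvStar (cs.getD a ' ') then pvSet2 t a a true else t) from rfl]
    rw [hget i j hi hj]
    by_cases c1 : i = j ∧ i ∈ l ∧ pvStar (cs.getD i ' ') = true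
    · rw [if_pos c1, if_pos ⟨c1.1, by simp [c1.2.1], c1.2.2⟩]
    · rw [if_neg c1]
      by_cases c2 : i = j ∧ i ∈ a :: l ∧ pvStar (cs.getD i ' ') = true
      · rw [if_pos c2]
        obtain ⟨hij, hmem, hst⟩ := c2
        have hia : i = a := by
          rcases List.mem_cons.mp hmem with h | h
          · exact h
          · exact absurd ⟨hij, h, hst⟩ c1
        subst hia
        rw [if_pos hst, show j = i from hij.symm]
        exact pvGet2_set2_self n t i i true hsh hi hi
      · rw [if_neg c2]
        split
        · rename_i hstar
          rw [pvGet2_set2_ne]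
          by_cases hii : a = i
          · right
            intro hjj
            exact c2 ⟨by omega, by simp [hii], by rwa [← hii]⟩
          · left; exact hii
        · rfl

theorem pvLoop2_get : ∀ (cs : List Char) (n : Nat) (l : List Nat) (t : List (List Bool)),
    pvShape n t → (∀ x ∈ l, x + 1 < n) →
    pvShape n (pvLoop2 cs l t) ∧ ∀ i j, i < n → j < n →
      pvGet2 (pvLoop2 cs l t) i j =
        if j = i + 1 ∧ i ∈ l ∧ (pvOpenC (cs.getD i ' ') && pvCloseC (cs.getD (i+1) ' ')) = true then true
        else pvGet2 t i j := by
  intro cs n l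
  induction l with
  | nil =>
    intro t hsh _
    exact ⟨hsh, fun i j hi hj => by rw [if_neg (by simp)]; rfl⟩
  | cons a l ih =>
    intro t hsh hb
    have ha : a + 1 < n := hb a (by simp)
    have hsh' : pvShape n (if pvOpenC (cs.getD a ' ') && pvCloseC (cs.getD (a+1) ' ') then pvSet2 t a (a+1) true else t) := by
      split
      · exact pvShape_set2 n t a (a+1) true hsh
      · exact hsh
    obtain ⟨hsh2, hget⟩ := ih _ hsh' (fun x hx => hb x (by simp [hx]))
    refine ⟨hsh2, fun i j hi hj => ?_⟩
    rw [show pvLoop2 cs (a :: l) t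
        = pvLoop2 cs l (if pvOpenC (cs.getD a ' ') && pvCloseC (cs.getD (a+1) ' ') then pvSet2 t a (a+1) true else t) from rfl]
    rw [hget i j hi hj]
    by_cases c1 : j = i + 1 ∧ i ∈ l ∧ (pvOpenC (cs.getD i ' ') && pvCloseC (cs.getD (i+1) ' ')) = true
    · rw [if_pos c1, if_pos ⟨c1.1, by simp [c1.2.1], c1.2.2⟩]
    · rw [if_neg c1]
      by_cases c2 : j = i + 1 ∧ i ∈ a :: l ∧ (pvOpenC (cs.getD i ' ') && pvCloseC (cs.getD (i+1) ' ')) = true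
      · rw [if_pos c2]
        obtain ⟨hij, hmem, hoc⟩ := c2
        have hia : i = a := by
          rcases List.mem_cons.mp hmem with h | h
          · exact h
          · exact absurd ⟨hij, h, hoc⟩ c1
        subst hia
        rw [if_pos hoc, show j = i + 1 from hij]
        exact pvGet2_set2_self n t i (i+1) true hsh hi (by omega)
      · rw [if_neg c2]
        split
        · rename_i hoc
          rw [pvGet2_set2_ne]
          by_cases hii : a = i
          · right
            intro hjj
            exact c2 ⟨by omega, by simp [hii], by rwa [← hii]⟩
          · left; exact hii
        · rfl

theorem pvLoop1_good : ∀ (cs : List Char) (n : Nat) (t : List (List Bool)), n = cs.length → 0 < n →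
    pvGood cs n 0 t → pvGood cs n 1 (pvLoop1 cs (List.range n) t) := by
  intro cs n t hn hpos hgood
  obtain ⟨hsh, hchart⟩ := hgood
  obtain ⟨hsh2, hget⟩ := pvLoop1_get cs n (List.range n) t hsh (fun x hx => by simpa using hx)
  refine ⟨hsh2, fun i j hi hj => ?_⟩
  rw [hget i j hi hj, hchart i j hi hj]
  have hdiag : ∀ m, m < n → pvDpF cs n m m = pvStar (cs.getD m ' ') := by
    intro m hm
    cases n with
    | zero => omega
    | succ f => exact pvDpF_diag cs f m
  by_cases hij : i = j
  · subst hij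
    rw [hdiag i hi, if_neg (show ¬(i ≤ i ∧ i < i + 0) by omega),
      if_pos (show i ≤ i ∧ i < i + 1 by omega)]
    by_cases hst : pvStar (cs.getD i ' ') = true
    · rw [if_pos ⟨rfl, List.mem_range.mpr hi, hst⟩, hst]
    · rw [if_neg (fun hc => hst hc.2.2)]
      rw [Bool.not_eq_true] at hst
      exact hst.symm
  · rw [if_neg (fun hc => hij hc.1), if_neg (show ¬(i ≤ j ∧ j < i + 0) by omega),
      if_neg (show ¬(i ≤ j ∧ j < i + 1) by omega)]

theorem pvLoop2_good : ∀ (cs : List Char) (n : Nat) (t : List (List Bool)), n = cs.length → 0 < n →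
    pvGood cs n 1 t → pvGood cs n 2 (pvLoop2 cs (List.range (n - 1)) t) := by
  intro cs n t hn hpos hgood
  obtain ⟨hsh, hchart⟩ := hgood
  obtain ⟨hsh2, hget⟩ := pvLoop2_get cs n (List.range (n-1)) t hsh (fun x hx => by simp at hx; omega)
  refine ⟨hsh2, fun i j hi hj => ?_⟩
  rw [hget i j hi hj, hchart i j hi hj]
  by_cases hij : j = i + 1
  · subst hij
    have hlen2 : pvDpF cs n i (i+1) = (pvOpenC (cs.getD i ' ') && pvCloseC (cs.getD (i+1) ' ')) := by
      cases n with
      | zero => omega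
      | succ m =>
        cases m with
        | zero => omega
        | succ f => exact pvDpF_len2 cs f i
    rw [if_neg (show ¬(i ≤ i + 1 ∧ i + 1 < i + 1) by omega),
      if_pos (show i ≤ i + 1 ∧ i + 1 < i + 2 by omega), hlen2]
    by_cases hoc : (pvOpenC (cs.getD i ' ') && pvCloseC (cs.getD (i+1) ' ')) = true
    · rw [if_pos ⟨rfl, List.mem_range.mpr (by omega), hoc⟩, hoc]
    · rw [if_neg (fun hc => hoc hc.2.2)]
      rw [Bool.not_eq_true] at hoc
      exact hoc.symm
  · rw [if_neg (fun hc => hij hc.1)]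
    by_cases hii : i = j
    · subst hii
      rw [if_pos (show i ≤ i ∧ i < i + 1 by omega), if_pos (show i ≤ i ∧ i < i + 2 by omega)]
    · rw [if_neg (show ¬(i ≤ j ∧ j < i + 1) by omega), if_neg (show ¬(i ≤ j ∧ j < i + 2) by omega)]

theorem pvKLoop_spec : ∀ (i j : Nat) (l : List Nat) (t : List (List Bool)),
    pvKLoop i j l t = if l.any (fun k => pvGet2 t i k && pvGet2 t (k + 1) j) then pvSet2 t i j true else t := by
  intro i j l
  induction l with
  | nil => intro t; simp [pvKLoop]
  | cons k l ih =>
    intro t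
    show (if pvGet2 t i k && pvGet2 t (k+1) j then pvSet2 t i j true else pvKLoop i j l t) = _
    cases h : (pvGet2 t i k && pvGet2 t (k+1) j) with
    | true => simp [h]
    | false => simp [h, ih t]

theorem pvBody_good : ∀ (cs : List Char) (n L m : Nat) (t : List (List Bool)), n = cs.length →
    3 ≤ L → L ≤ n → m + L ≤ n → pvGoodP cs n L m t →
    pvGoodP cs n L (m + 1) (pvBody cs t m (m + L - 1)) := by
  intro cs n L m t hn hL3 hLn hmL hgp
  obtain ⟨hsh, hchart⟩ := hgp
  have hjn : m + L - 1 < n := by omega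
  have hmn : m < n := by omega
  have hread1 : pvGet2 t (m+1) (m + L - 1) = pvDpF cs n (m+1) (m + L - 1) := by
    rw [hchart (m+1) (m + L - 1) (by omega) (by omega), if_pos ⟨by omega, Or.inl (by omega)⟩]
  have hread2 : pvGet2 t (m+1) (m + L - 1 - 1) = pvDpF cs n (m+1) (m + L - 1 - 1) := by
    rw [hchart (m+1) (m + L - 1 - 1) (by omega) (by omega), if_pos ⟨by omega, Or.inl (by omega)⟩]
  have hreadk : ∀ k, m ≤ k → k < m + L - 1 →
      pvGet2 t m k = pvDpF cs n m k ∧ pvGet2 t (k+1) (m + L - 1) = pvDpF cs n (k+1) (m + L - 1) := by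
    intro k h1 h2
    constructor
    · rw [hchart m k (by omega) (by omega), if_pos ⟨h1, Or.inl (by omega)⟩]
    · rw [hchart (k+1) (m + L - 1) (by omega) (by omega), if_pos ⟨by omega, Or.inl (by omega)⟩]
  obtain ⟨f, hf⟩ : ∃ f, n = f + 1 := ⟨n - 1, by omega⟩
  have hexp : pvDpF cs n m (m + L - 1)
      = ((pvStar (cs.getD m ' ') && pvDpF cs n (m+1) (m + L - 1))
        || ((pvOpenC (cs.getD m ' ') && pvCloseC (cs.getD (m + L - 1) ' '))
              && ((m + L - 1 == m + 1) || pvDpF cs n (m+1) (m + L - 1 - 1)))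
        || (List.range' m (m + L - 1 - m)).any fun k => pvDpF cs n m k && pvDpF cs n (k+1) (m + L - 1)) := by
    conv_lhs => rw [hf, pvDpF]
    rw [if_neg (by omega)]
    rw [pvDpF_stable cs f n (m+1) (m + L - 1) (by omega) (by omega),
        pvDpF_stable cs f n (m+1) (m + L - 1 - 1) (by omega) (by omega)]
    congr 1
    apply pvAnyCongr
    intro k hk
    rw [List.mem_range'_1] at hk
    rw [pvDpF_stable cs f n m k (by omega) (by omega),
        pvDpF_stable cs f n (k+1) (m + L - 1) (by omega) (by omega)]
  have hany : ((List.range' m (m + L - 1 - m)).any fun k => pvGet2 t m k && pvGet2 t (k+1) (m + L - 1))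
      = ((List.range' m (m + L - 1 - m)).any fun k => pvDpF cs n m k && pvDpF cs n (k+1) (m + L - 1)) := by
    apply pvAnyCongr
    intro k hk
    rw [List.mem_range'_1] at hk
    rw [(hreadk k (by omega) (by omega)).1, (hreadk k (by omega) (by omega)).2]
  have hbody : pvBody cs t m (m + L - 1) = (if pvDpF cs n m (m + L - 1) then pvSet2 t m (m + L - 1) true else t) := by
    rw [pvBody, pvKLoop_spec, hread1, hread2, hany, hexp]
    generalize (pvStar (cs.getD m ' ') && pvDpF cs n (m+1) (m + L - 1)) = A
    generalize ((pvOpenC (cs.getD m ' ') && pvCloseC (cs.getD (m + L - 1) ' '))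
        && ((m + L - 1 == m + 1) || pvDpF cs n (m+1) (m + L - 1 - 1))) = B
    generalize ((List.range' m (m + L - 1 - m)).any fun k => pvDpF cs n m k && pvDpF cs n (k+1) (m + L - 1)) = C
    cases A <;> cases B <;> cases C <;> simp
  constructor
  · rw [hbody]
    split
    · exact pvShape_set2 n t m (m + L - 1) true hsh
    · exact hsh
  · intro i' j' hi' hj'
    rw [hbody]
    by_cases hme : i' = m ∧ j' = m + L - 1
    · obtain ⟨h1, h2⟩ := hme
      rw [h1, h2]
      have hcond : (m ≤ m + L - 1 ∧ (m + L - 1 < m + (L - 1) ∨ (m + L - 1 + 1 = m + L ∧ m < m + 1))) :=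
        ⟨by omega, Or.inr ⟨by omega, by omega⟩⟩
      rw [if_pos hcond]
      cases hdp : pvDpF cs n m (m + L - 1) with
      | true =>
        rw [if_pos rfl]
        exact pvGet2_set2_self n t m (m + L - 1) true hsh hmn hjn
      | false =>
        rw [if_neg (by simp)]
        rw [hchart m (m + L - 1) hmn hjn, if_neg (by rintro ⟨q1, q2 | q3⟩ <;> omega)]
    · have hne : m ≠ i' ∨ m + L - 1 ≠ j' := by tauto
      have hsame : pvGet2 (if pvDpF cs n m (m + L - 1) then pvSet2 t m (m + L - 1) true else t) i' j'
          = pvGet2 t i' j' := by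
        split
        · exact pvGet2_set2_ne t m (m + L - 1) i' j' true hne
        · rfl
      rw [hsame, hchart i' j' hi' hj']
      by_cases c : i' ≤ j' ∧ (j' < i' + (L - 1) ∨ (j' + 1 = i' + L ∧ i' < m))
      · rw [if_pos c, if_pos ⟨c.1, by rcases c.2 with q | q; exact Or.inl q; exact Or.inr ⟨q.1, by omega⟩⟩]
      · rw [if_neg c, if_neg ?_]
        rintro ⟨q1, q2 | q3⟩
        · exact c ⟨q1, Or.inl q2⟩
        · by_cases hi'm : i' < m
          · exact c ⟨q1, Or.inr ⟨q3.1, hi'm⟩⟩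
          · have : i' = m := by omega
            exact hme ⟨this, by omega⟩

theorem pvILoop_good : ∀ (cs : List Char) (n L : Nat), n = cs.length → 3 ≤ L → L ≤ n →
    ∀ (cnt m : Nat) (t : List (List Bool)), m + cnt = n - L + 1 → pvGoodP cs n L m t →
    pvGoodP cs n L (n - L + 1) (pvILoop cs L (List.range' m cnt) t) := by
  intro cs n L hn hL3 hLn cnt
  induction cnt with
  | zero =>
    intro m t hm hgp
    have hmeq : m = n - L + 1 := by omega
    subst hmeq
    exact hgp
  | succ cnt ih =>
    intro m t hm hgp
    show pvGoodP cs n L (n - L + 1) (pvILoop cs L (List.range' (m+1) cnt) (pvBody cs t m (m + L - 1)))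
    exact ih (m+1) _ (by omega) (pvBody_good cs n L m t hn hL3 hLn (by omega) hgp)

theorem pvGoodP_zero : ∀ (cs : List Char) (n L : Nat) (t : List (List Bool)), 3 ≤ L →
    pvGood cs n (L - 1) t → pvGoodP cs n L 0 t := by
  intro cs n L t hL3 hgood
  obtain ⟨hsh, hchart⟩ := hgood
  refine ⟨hsh, fun i j hi hj => ?_⟩
  rw [hchart i j hi hj]
  by_cases c : i ≤ j ∧ j < i + (L - 1)
  · rw [if_pos c, if_pos ⟨c.1, Or.inl c.2⟩]
  · rw [if_neg c, if_neg ?_]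
    rintro ⟨h1, h2 | h3⟩
    · exact c ⟨h1, h2⟩
    · omega

theorem pvGoodP_full : ∀ (cs : List Char) (n L : Nat) (t : List (List Bool)), 3 ≤ L → L ≤ n →
    pvGoodP cs n L (n - L + 1) t → pvGood cs n L t := by
  intro cs n L t hL3 hLn hgood
  obtain ⟨hsh, hchart⟩ := hgood
  refine ⟨hsh, fun i j hi hj => ?_⟩
  rw [hchart i j hi hj]
  by_cases c : i ≤ j ∧ j < i + L
  · rw [if_pos c, if_pos ⟨c.1, by omega⟩]
  · rw [if_neg ?_, if_neg c]
    rintro ⟨h1, h2 | h3⟩ <;> · exact c ⟨h1, by omega⟩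

theorem pvLLoop_good : ∀ (cs : List Char) (n : Nat), n = cs.length →
    ∀ (cnt L0 : Nat) (t : List (List Bool)), 2 ≤ L0 → L0 + cnt ≤ n →
    pvGood cs n L0 t → pvGood cs n (L0 + cnt) (pvLLoop cs n (List.range' (L0 + 1) cnt) t) := by
  intro cs n hn cnt
  induction cnt with
  | zero =>
    intro L0 t h2 hle hgood
    simpa using hgood
  | succ cnt ih =>
    intro L0 t h2 hle hgood
    have hL3 : 3 ≤ L0 + 1 := by omega
    have hLn : L0 + 1 ≤ n := by omega
    have step : pvGood cs n (L0 + 1) (pvILoop cs (L0+1) (List.range (n - (L0+1) + 1)) t) := by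
      apply pvGoodP_full cs n (L0+1) _ hL3 hLn
      rw [List.range_eq_range']
      exact pvILoop_good cs n (L0+1) hn hL3 hLn (n - (L0+1) + 1) 0 t (by omega)
        (pvGoodP_zero cs n (L0+1) t hL3 (by simpa using hgood))
    show pvGood cs n (L0 + (cnt + 1)) (pvLLoop cs n (List.range' (L0+1+1) cnt) _)
    have := ih (L0+1) _ (by omega) (by omega) step
    rwa [show L0 + 1 + cnt = L0 + (cnt + 1) by omega] at this

theorem pvA_eq_dpF : ∀ (s : String), 0 < s.toList.length →
    checkValidString_dp s = pvDpF s.toList s.toList.length 0 (s.toList.length - 1) := by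
  intro s hpos
  rw [checkValidString_dp]
  simp only [if_neg (by omega : ¬ s.toList.length = 0)]
  have hg2 : pvGood s.toList s.toList.length 2
      (pvLoop2 s.toList (List.range (s.toList.length - 1))
        (pvLoop1 s.toList (List.range s.toList.length)
          (List.replicate s.toList.length (List.replicate s.toList.length false)))) := by
    apply pvLoop2_good s.toList s.toList.length _ rfl hpos
    apply pvLoop1_good s.toList s.toList.length _ rfl hpos
    exact pvGood_init s.toList s.toList.length
  by_cases h1 : s.toList.length = 1
  · have hrange : List.range' 3 (s.toList.length + 1 - 3) = [] := by
      rw [h1]; rfl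
    rw [hrange]
    obtain ⟨hsh, hchart⟩ := hg2
    rw [pvLLoop]
    rw [hchart 0 (s.toList.length - 1) (by omega) (by omega), if_pos ⟨by omega, by omega⟩]
  · have hfin : pvGood s.toList s.toList.length (2 + (s.toList.length - 2)) _ :=
      pvLLoop_good s.toList s.toList.length rfl (s.toList.length - 2) 2 _ (by omega) (by omega) hg2
    rw [show (2 : Nat) + (s.toList.length - 2) = s.toList.length by omega] at hfin
    obtain ⟨hsh, hchart⟩ := hfin
    show pvGet2 (pvLLoop s.toList s.toList.length (List.range' 3 (s.toList.length + 1 - 3)) _) 0 (s.toList.length - 1) = _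
    have hrw : List.range' 3 (s.toList.length + 1 - 3) = List.range' (2+1) (s.toList.length - 2) := by
      rw [show s.toList.length + 1 - 3 = s.toList.length - 2 by omega]
    rw [hrw]
    rw [hchart 0 (s.toList.length - 1) (by omega) (by omega), if_pos ⟨by omega, by omega⟩]

-- ===== VERDICT (by name: the statement is the Claim_ definition above) =====
theorem checkValidString_dp_spec : Claim_equal_checkValidString_dp := by
  intro s _
  show checkValidString_dp s = checkValidString_dp_alt s
  by_cases h0 : s.toList.length = 0
  · have hnil : s.toList = [] := List.eq_nil_of_length_eq_zero h0
    rw [checkValidString_dp, checkValidString_dp_alt, hnil]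
    rfl
  · have hpos : 0 < s.toList.length := by omega
    rw [pvA_eq_dpF s hpos]
    have hmain := pvDpF_ach s.toList (s.toList.length - 1) 0 (by omega)
    rw [show s.toList.length - 1 + 1 = s.toList.length by omega] at hmain
    have hslice : pvSlice s.toList 0 s.toList.length = s.toList := by
      simp [pvSlice]
    rw [hslice] at hmain
    have hb' : pvBLoop s.toList 0 0 = true ↔ pvAch s.toList 0 0 = true := by
      rw [pvBLoop_iff s.toList 0 0 (le_refl 0) (le_refl 0)]
      constructor
      · rintro ⟨c, h1, h2, h3⟩
        have hc0 : c = 0 := by omega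
        rwa [hc0] at h3
      · intro hh
        exact ⟨0, le_refl _, le_refl _, hh⟩
    rw [checkValidString_dp_alt, Bool.eq_iff_iff]
    rw [hb']
    have hz : (0 : Nat) + (s.toList.length - 1) = s.toList.length - 1 := by omega
    rw [hz] at hmain
    exact hmain
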